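-- pv_equiv track=rewrite | github.com/copev313/Advent-of-Code-2021 | Day3/puzzle1.py | find_gamma_rate
-- ===== SOURCE A (Python) =====
-- def find_gamma_rate(binary_input: list[str]) -> str:
--     """Finds the gamma rate from the binary input.
--
--     Gamma rate is calculated as the most common value for a given bit
--     position.
--
--     Returns
--     -------
--     str
--         The gamma rate as a binary string.
--     """
--     # Init a string to append to later:
--     gamma_rate = '0b'
--     # Grab the length of a value from the list:
--     value_length = len(binary_input[0])
--
--     # Iterate through the bit positions:
--     for i in range(value_length):
--         num_ones, num_zeroes = 0, 0
--
--         # Iterate through the list of values: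
--         for value in binary_input:
--             if value[i] == '1':
--                 num_ones += 1
--             elif value[i] == '0':
--                 num_zeroes += 1
--
--         # Determine which value is most common:
--         if num_ones > num_zeroes:
--             gamma_rate += '1'
--         else:
--             gamma_rate += '0'
--
--     return gamma_rate
-- ===== SOURCE B (Python) =====
-- def find_gamma_rate(binary_input: list[str]) -> str:
--     """Single pass over the input keeping a per-position balance (+1 for '1',
--     -1 for '0', 0 otherwise); then decide each output bit from its sign."""
--     value_length = len(binary_input[0])
--     balance = [0] * value_length
--     for value in binary_input:
--         balance = [b + (1 if c == '1' else -1 if c == '0' else 0)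
--                    for b, c in zip(balance, value)]
--     return '0b' + ''.join('1' if b > 0 else '0' for b in balance)
-- ===== Notes on version B (the rewrite author's own statement) =====
-- stated objective: alternative
-- what changed: Replaces the per-bit-position rescans of the whole list (one full pass per column, counting ones and zeroes) with a single pass over the list maintaining a per-position balance array, then builds the result from the signs.
import Mathlib
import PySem

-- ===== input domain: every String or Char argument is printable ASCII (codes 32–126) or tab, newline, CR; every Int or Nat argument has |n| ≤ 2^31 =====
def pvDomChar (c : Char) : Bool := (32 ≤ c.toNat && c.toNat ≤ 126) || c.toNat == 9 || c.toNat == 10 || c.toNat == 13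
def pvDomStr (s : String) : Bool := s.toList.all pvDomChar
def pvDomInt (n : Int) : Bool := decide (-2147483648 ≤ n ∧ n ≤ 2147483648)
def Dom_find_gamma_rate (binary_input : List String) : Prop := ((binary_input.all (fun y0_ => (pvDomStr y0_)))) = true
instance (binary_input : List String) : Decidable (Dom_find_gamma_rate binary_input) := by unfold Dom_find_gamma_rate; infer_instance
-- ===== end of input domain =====

-- B replaces A's per-column rescans of the whole list by ONE pass keeping a per-position
-- balance (+1 for '1', -1 for '0'), then decides each output bit from its sign (same cost, different traversal).

-- ===== PORT A =====
-- literal port of A; `PySem.Str.pyGet? value i = none` is Python's IndexError (excluded by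
-- Pre_), the accumulator is left unchanged there.
def find_gamma_rate (binary_input : List String) : String :=
  let value_length : Int := PySem.Str.len ((PySem.List.pyGet? binary_input 0).getD "")
  String.ofList ((PySem.List.pyRange 0 value_length 1).foldl (fun gamma_rate i =>
    let p : Int × Int := binary_input.foldl (fun nz value =>
      match PySem.Str.pyGet? value i with
      | some c => if c = '1' then (nz.1 + 1, nz.2) else if c = '0' then (nz.1, nz.2 + 1) else nz
      | none => nz) (0, 0)
    if p.1 > p.2 then gamma_rate ++ ['1'] else gamma_rate ++ ['0']) ['0', 'b'])

-- ===== PORT B =====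
def pvContrib (c : Char) : Int := if c = '1' then 1 else if c = '0' then -1 else 0

-- literal port of Source B: List.zipWith truncates exactly like Python's zip; len(binary_input[0])
-- is `.toList.length` of binary_input[0] (IndexError on [] is outside Pre_, getD "" there).
def find_gamma_rate_alt (binary_input : List String) : String :=
  let value_length : Nat := ((PySem.List.pyGet? binary_input 0).getD "").toList.length
  let balance : List Int := binary_input.foldl
    (fun bal value => List.zipWith (fun b c => b + pvContrib c) bal value.toList)
    (List.replicate value_length 0)
  String.ofList (['0', 'b'] ++ balance.map (fun b => if b > 0 then '1' else '0'))

-- ===== PRECONDITION & SPEC =====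
-- Pre_ excludes exactly the inputs where A raises IndexError: the empty list
-- (binary_input[0]) and lists containing a string shorter than the first one (value[i]).
def Pre_find_gamma_rate (binary_input : List String) : Prop :=
  binary_input ≠ [] ∧
    ∀ s ∈ binary_input, (binary_input.headD "").toList.length ≤ s.toList.length
instance (binary_input : List String) : Decidable (Pre_find_gamma_rate binary_input) := by
  unfold Pre_find_gamma_rate; infer_instance
def pvWitness_find_gamma_rate : List String := ["10", "01", "11"]
def Spec_find_gamma_rate (binary_input : List String) (out : String) : Prop := out = find_gamma_rate_alt binary_input
instance (binary_input : List String) (out : String) : Decidable (Spec_find_gamma_rate binary_input out) := by unfold Spec_find_gamma_rate; infer_instance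

-- ===== CLAIM (what is proved, stated in full; the proofs are below) =====
def Claim_equal_find_gamma_rate : Prop := ∀ (binary_input : List String), Dom_find_gamma_rate binary_input → Pre_find_gamma_rate binary_input → Spec_find_gamma_rate binary_input (find_gamma_rate binary_input)

-- ===== LEMMAS AND PROOFS =====

-- the per-position balance both programs compute, as a sum over the list
def pvColsum (bi : List String) (i : Nat) : Int :=
  (bi.map (fun s => pvContrib (s.toList.getD i ' '))).sum

-- B's single pass: the final balance list is the list of column sums.
theorem pv_balance_foldl (bi : List String) : ∀ (bal : List Int),
    (∀ s ∈ bi, bal.length ≤ s.toList.length) →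
    bi.foldl (fun bal value => List.zipWith (fun b c => b + pvContrib c) bal value.toList) bal
      = (List.range bal.length).map (fun i => bal.getD i 0 + pvColsum bi i) := by
  induction bi with
  | nil =>
      intro bal _
      apply List.ext_getElem (by simp)
      intro i h1 h2
      have h1' : i < bal.length := by simpa using h1
      simp [pvColsum, List.getElem?_eq_getElem h1']
  | cons s bi ih =>
      intro bal h
      have hs : bal.length ≤ s.toList.length := h s List.mem_cons_self
      have hlen : (List.zipWith (fun b c => b + pvContrib c) bal s.toList).length = bal.length := by
        rw [List.length_zipWith]; omega
      rw [List.foldl_cons, ih _ (by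
        intro t ht
        rw [hlen]
        exact h t (List.mem_cons_of_mem _ ht)), hlen]
      refine List.map_congr_left ?_
      intro i hi
      have hib : i < bal.length := by simpa using hi
      have his : i < s.toList.length := lt_of_lt_of_le hib hs
      rw [List.getD_eq_getElem _ _ (by omega : i < (List.zipWith (fun b c => b + pvContrib c) bal s.toList).length),
          List.getElem_zipWith, List.getD_eq_getElem _ _ hib]
      simp only [pvColsum, List.map_cons, List.sum_cons, List.getD_eq_getElem _ _ his]
      ring

-- A's inner loop: the running (ones, zeroes) pair, through its difference.
theorem pv_inner (i : Nat) (bi : List String) : ∀ (o z : Int),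
    (∀ s ∈ bi, i < s.toList.length) →
    (bi.foldl (fun nz value =>
      match PySem.Str.pyGet? value (i : Int) with
      | some c => if c = '1' then (nz.1 + 1, nz.2) else if c = '0' then (nz.1, nz.2 + 1) else nz
      | none => nz) (o, z)).1
    - (bi.foldl (fun nz value =>
      match PySem.Str.pyGet? value (i : Int) with
      | some c => if c = '1' then (nz.1 + 1, nz.2) else if c = '0' then (nz.1, nz.2 + 1) else nz
      | none => nz) (o, z)).2 = o - z + pvColsum bi i := by
  induction bi with
  | nil => intro o z _; simp [pvColsum]
  | cons s bi ih =>
      intro o z h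
      have his : i < s.toList.length := h s List.mem_cons_self
      have h2 : ∀ t ∈ bi, i < t.toList.length := fun t ht => h t (List.mem_cons_of_mem _ ht)
      have hget : PySem.Str.pyGet? s (i : Int) = some s.toList[i] := by
        simp [List.getElem?_eq_getElem his]
      have hcol : pvColsum (s :: bi) i = pvContrib s.toList[i] + pvColsum bi i := by
        simp [pvColsum, List.getD, List.getElem?_eq_getElem his]
      by_cases h1 : s.toList[i] = '1'
      · have hfold : List.foldl (fun (nz : Int × Int) (value : String) =>
            match PySem.Str.pyGet? value (i : Int) with
            | some c => if c = '1' then (nz.1 + 1, nz.2) else if c = '0' then (nz.1, nz.2 + 1) else nz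
            | none => nz) (o, z) (s :: bi)
            = List.foldl (fun (nz : Int × Int) (value : String) =>
            match PySem.Str.pyGet? value (i : Int) with
            | some c => if c = '1' then (nz.1 + 1, nz.2) else if c = '0' then (nz.1, nz.2 + 1) else nz
            | none => nz) (o + 1, z) bi := by
          rw [List.foldl_cons]; congr 1; simp [List.getElem?_eq_getElem his, h1]
        rw [hfold, ih (o + 1) z h2, hcol]
        simp [pvContrib, h1]; ring
      · by_cases h0 : s.toList[i] = '0'
        · have hfold : List.foldl (fun (nz : Int × Int) (value : String) =>
              match PySem.Str.pyGet? value (i : Int) with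
              | some c => if c = '1' then (nz.1 + 1, nz.2) else if c = '0' then (nz.1, nz.2 + 1) else nz
              | none => nz) (o, z) (s :: bi)
              = List.foldl (fun (nz : Int × Int) (value : String) =>
              match PySem.Str.pyGet? value (i : Int) with
              | some c => if c = '1' then (nz.1 + 1, nz.2) else if c = '0' then (nz.1, nz.2 + 1) else nz
              | none => nz) (o, z + 1) bi := by
            rw [List.foldl_cons]; congr 1; simp [List.getElem?_eq_getElem his, h0]
          rw [hfold, ih o (z + 1) h2, hcol]
          simp [pvContrib, h0]; ring
        · have hfold : List.foldl (fun (nz : Int × Int) (value : String) =>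
              match PySem.Str.pyGet? value (i : Int) with
              | some c => if c = '1' then (nz.1 + 1, nz.2) else if c = '0' then (nz.1, nz.2 + 1) else nz
              | none => nz) (o, z) (s :: bi)
              = List.foldl (fun (nz : Int × Int) (value : String) =>
              match PySem.Str.pyGet? value (i : Int) with
              | some c => if c = '1' then (nz.1 + 1, nz.2) else if c = '0' then (nz.1, nz.2 + 1) else nz
              | none => nz) (o, z) bi := by
            rw [List.foldl_cons]; congr 1; simp [List.getElem?_eq_getElem his, h1, h0]
          rw [hfold, ih o z h2, hcol]
          simp [pvContrib, h1, h0]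

theorem find_gamma_rate_spec : Claim_equal_find_gamma_rate := by
  intro binary_input _ hpre
  obtain ⟨hne, hlen⟩ := hpre
  match binary_input with
  | [] => exact absurd rfl hne
  | x :: xs =>
      unfold Spec_find_gamma_rate find_gamma_rate find_gamma_rate_alt
      simp only [PySem.List.pyGet?_zero_cons, Option.getD_some, PySem.Str.len_eq]
      set L := x.toList.length with hL
      have hall : ∀ s ∈ x :: xs, L ≤ s.toList.length := by
        intro s hs
        have := hlen s hs
        simpa using this
      -- B side: balance is the list of column sums
      rw [pv_balance_foldl (x :: xs) (List.replicate L 0) (by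
        intro s hs; rw [List.length_replicate]; exact hall s hs)]
      rw [List.length_replicate]
      -- A side: turn the pyRange fold into a map over List.range L
      rw [PySem.List.pyRange_zero_nat, List.foldl_map]
      rw [PySem.List.foldl_congr_mem (List.range L) _
        (fun (g : List Char) (k : Nat) => g ++ [if pvColsum (x :: xs) k > 0 then '1' else '0'])
        ['0', 'b'] ?_, PySem.List.foldl_append_singleton_eq_map]
      · -- both sides are '0b' ++ the decision characters
        congr 1
        congr 1
        rw [List.map_map]
        refine List.map_congr_left ?_
        intro k hk
        simp
      · intro g k hk
        have hkL : k < L := List.mem_range.mp hk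
        have hidx : ∀ s ∈ x :: xs, k < s.toList.length :=
          fun s hs => lt_of_lt_of_le hkL (hall s hs)
        have hdiff := pv_inner k (x :: xs) 0 0 hidx
        by_cases hq : pvColsum (x :: xs) k > 0
        · rw [if_pos (by omega)]; simp [hq]
        · rw [if_neg (by omega)]; simp [hq]
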